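-- pv_equiv track=rewrite | github.com/Siphoin/Nagatoro-Novel-Game | code_editor/src/highlighter.py | index_of_hash_outside_quotes
-- ===== SOURCE A (Python) =====
-- def index_of_hash_outside_quotes(line: str) -> int:
--     """Find # outside quotes (IndexOfHashOutsideQuotes)."""
--     in_single = False
--     in_double = False
--     for i, c in enumerate(line):
--         if c == '\'' and not in_double:
--             in_single = not in_single
--         elif c == '"' and not in_single:
--             in_double = not in_double
--         elif c == '#' and not in_single and not in_double:
--             return i
--     return -1
-- ===== SOURCE B (Python) =====
-- def index_of_hash_outside_quotes(line: str) -> int: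
--     """Find # outside quotes: jump-based scan that skips whole quoted spans via str.find."""
--     i = 0
--     n = len(line)
--     while i < n:
--         c = line[i]
--         if c == '#':
--             return i
--         if c == "'" or c == '"':
--             j = line.find(c, i + 1)
--             if j == -1:
--                 return -1
--             i = j + 1
--         else:
--             i += 1
--     return -1
-- ===== Notes on version B (the rewrite author's own statement) =====
-- stated objective: alternative
-- what changed: Replaced the per-character two-boolean-flag state machine with a jump-based scan that, on seeing a quote, uses str.find to skip the whole quoted span at once and resume after the closing quote.
import Mathlib
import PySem

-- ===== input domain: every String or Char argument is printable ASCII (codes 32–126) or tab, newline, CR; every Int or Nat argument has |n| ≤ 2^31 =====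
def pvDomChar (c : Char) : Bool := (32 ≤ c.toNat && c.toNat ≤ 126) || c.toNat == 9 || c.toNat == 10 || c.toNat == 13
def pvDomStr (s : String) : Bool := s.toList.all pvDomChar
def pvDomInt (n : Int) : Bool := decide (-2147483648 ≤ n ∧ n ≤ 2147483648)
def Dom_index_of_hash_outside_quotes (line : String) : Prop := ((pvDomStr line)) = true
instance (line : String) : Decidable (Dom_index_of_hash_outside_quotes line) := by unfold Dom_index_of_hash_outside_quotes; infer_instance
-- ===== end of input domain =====

-- B replaces A's per-character two-flag state machine by a jump scan that skips each whole
-- quoted span at once (find the closing quote and resume after it); objective: alternative.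

-- ===== PORT A =====
-- the for-loop over enumerate(line) with the two boolean flags, step for step
def pvAGo : List Char → Bool → Bool → Int → Int
  | [], _, _, _ => -1
  | c :: rest, inS, inD, i =>
    if c == '\'' && !inD then pvAGo rest (!inS) inD (i + 1)
    else if c == '"' && !inS then pvAGo rest inS (!inD) (i + 1)
    else if c == '#' && !inS && !inD then i
    else pvAGo rest inS inD (i + 1)

def index_of_hash_outside_quotes (line : String) : Int :=
  pvAGo line.toList false false 0

-- ===== PORT B =====
lemma pvDropLenLe (l : List Char) (k : Nat) : (l.drop k).length ≤ l.length := by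
  simp [List.length_drop]
-- Source B's while loop over positions, recursing on the remaining suffix; line.find(c, i+1)
-- becomes findIdx? on the suffix (index relative to the suffix)
def pvBGo (cs : List Char) (i : Int) : Int :=
  match cs with
  | [] => -1
  | c :: rest =>
    if c == '#' then i
    else if c == '\'' || c == '"' then
      match h : rest.findIdx? (· == c) with
      | none => -1
      | some j => pvBGo (rest.drop (j + 1)) (i + 1 + (j : Int) + 1)
    else pvBGo rest (i + 1)
termination_by cs.length
decreasing_by
  · simp only [List.length_cons]
    have := pvDropLenLe rest (j + 1)
    omega
  · simp

def index_of_hash_outside_quotes_alt (line : String) : Int :=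
  pvBGo line.toList 0

-- ===== PRECONDITION & SPEC =====
def Spec_index_of_hash_outside_quotes (line : String) (out : Int) : Prop := out = index_of_hash_outside_quotes_alt line
instance (line : String) (out : Int) : Decidable (Spec_index_of_hash_outside_quotes line out) := by unfold Spec_index_of_hash_outside_quotes; infer_instance

-- ===== CLAIM (what is proved, stated in full; the proofs are below) =====
def Claim_equal_index_of_hash_outside_quotes : Prop := ∀ (line : String), Dom_index_of_hash_outside_quotes line → Spec_index_of_hash_outside_quotes line (index_of_hash_outside_quotes line)

-- ===== LEMMAS AND PROOFS =====

-- inside a single-quoted span A ignores everything until the closing '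
lemma pvA_skip_single : ∀ (cs : List Char) (i : Int),
    pvAGo cs true false i =
      match cs.findIdx? (· == '\'') with
      | none => -1
      | some j => pvAGo (cs.drop (j + 1)) false false (i + (j : Int) + 1) := by
  intro cs
  induction cs with
  | nil => intro i; simp [pvAGo, List.findIdx?, List.findIdx?.go]
  | cons c rest ih =>
    intro i
    by_cases hc : c = '\''
    · subst hc; simp [pvAGo, List.findIdx?_cons]
    · have h1 : (c == '\'') = false := by simp [hc]
      by_cases hd : c = '"'
      · subst hd
        simp only [pvAGo, List.findIdx?_cons, h1]
        simp only [ih (i + 1)]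
        cases h : rest.findIdx? (· == '\'') with
        | none => simp
        | some j =>
          simp only [Option.map_some, List.drop_succ_cons]
          simp
          try (congr 1; push_cast; ring)
      · have h2 : (c == '"') = false := by simp [hd]
        simp only [pvAGo, h1, h2, Bool.false_and, Bool.and_false, if_false, List.findIdx?_cons,
          beq_iff_eq, hc, if_false]
        simp only [ih (i + 1)]
        cases h : rest.findIdx? (· == '\'') with
        | none => simp
        | some j =>
          simp only [Option.map_some, List.drop_succ_cons]
          simp
          try (congr 1; push_cast; ring)

-- inside a double-quoted span A ignores everything until the closing "
lemma pvA_skip_double : ∀ (cs : List Char) (i : Int),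
    pvAGo cs false true i =
      match cs.findIdx? (· == '"') with
      | none => -1
      | some j => pvAGo (cs.drop (j + 1)) false false (i + (j : Int) + 1) := by
  intro cs
  induction cs with
  | nil => intro i; simp [pvAGo, List.findIdx?, List.findIdx?.go]
  | cons c rest ih =>
    intro i
    by_cases hd : c = '"'
    · subst hd; simp [pvAGo, List.findIdx?_cons]
    · have h2 : (c == '"') = false := by simp [hd]
      by_cases hc : c = '\''
      · subst hc
        simp only [pvAGo, Bool.not_true, Bool.and_false, if_false, h2, List.findIdx?_cons,
          if_false]
        simp only [ih (i + 1)]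
        cases h : rest.findIdx? (· == '"') with
        | none => simp
        | some j =>
          simp only [Option.map_some, List.drop_succ_cons]
          simp
          try (congr 1; push_cast; ring)
      · have h1 : (c == '\'') = false := by simp [hc]
        simp only [pvAGo, h1, h2, Bool.false_and, Bool.and_false, if_false, List.findIdx?_cons,
          if_false]
        simp only [ih (i + 1)]
        cases h : rest.findIdx? (· == '"') with
        | none => simp
        | some j =>
          simp only [Option.map_some, List.drop_succ_cons]
          simp
          try (congr 1; push_cast; ring)

lemma pvGo_eq_aux : ∀ (n : Nat) (cs : List Char), cs.length ≤ n → ∀ i : Int, pvAGo cs false false i = pvBGo cs i := by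
  intro n
  induction n with
  | zero =>
    intro cs h i
    cases cs with
    | nil => simp [pvAGo, pvBGo]
    | cons c rest => simp at h
  | succ n ih =>
    intro cs h i
    cases cs with
    | nil => simp [pvAGo, pvBGo]
    | cons c rest =>
      simp only [List.length_cons, Nat.succ_le_succ_iff] at h
      by_cases hh : c = '#'
      · subst hh; simp [pvAGo, pvBGo]
      · by_cases hs : c = '\''
        · subst hs
          rw [pvBGo]
          simp only [show (('\'' : Char) == '#') = false by decide, if_false,
            show (('\'' : Char) == '\'') = true by decide, Bool.true_or, if_true]
          simp only [pvAGo, show (('\'' : Char) == '\'') = true by decide, Bool.not_false,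
            Bool.and_true, if_true, Bool.not_false]
          rw [pvA_skip_single]
          cases hf : rest.findIdx? (· == '\'') with
          | none => simp
          | some j =>
            simp only []
            rw [ih (rest.drop (j + 1)) (le_trans (pvDropLenLe rest (j+1)) h)]
            simp
        · by_cases hd : c = '"'
          · subst hd
            rw [pvBGo]
            simp only [show (('"' : Char) == '#') = false by decide, if_false,
              show (('"' : Char) == '\'') = false by decide,
              show (('"' : Char) == '"') = true by decide, Bool.or_true, if_true]
            simp only [pvAGo, show (('"' : Char) == '\'') = false by decide,
              show (('"' : Char) == '"') = true by decide, Bool.false_and, if_false,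
              Bool.not_false, Bool.and_true, if_true]
            rw [pvA_skip_double]
            cases hf : rest.findIdx? (· == '"') with
            | none => simp
            | some j =>
              simp only []
              rw [ih (rest.drop (j + 1)) (le_trans (pvDropLenLe rest (j+1)) h)]
              simp
          · have h1 : (c == '\'') = false := by simp [hs]
            have h2 : (c == '"') = false := by simp [hd]
            have h3 : (c == '#') = false := by simp [hh]
            rw [pvBGo]
            simp only [h1, h2, h3, if_false, Bool.or_self, Bool.false_and, Bool.false_or]
            simp only [pvAGo, h1, h2, h3, Bool.false_and, if_false]
            exact ih rest h (i + 1)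

lemma pvGo_eq (cs : List Char) (i : Int) : pvAGo cs false false i = pvBGo cs i :=
  pvGo_eq_aux cs.length cs le_rfl i

-- ===== VERDICT (by name: the statement is the Claim_ definition above) =====
theorem index_of_hash_outside_quotes_spec : Claim_equal_index_of_hash_outside_quotes := by
  intro line _
  unfold Spec_index_of_hash_outside_quotes index_of_hash_outside_quotes index_of_hash_outside_quotes_alt
  exact pvGo_eq line.toList 0
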